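-- pv_equiv track=rewrite | github.com/illegaluser/kobimedi-poc | src/agent.py | _prioritize_missing_info
-- ===== SOURCE A (Python) =====
-- def _prioritize_missing_info(missing_info: list[str]) -> list[str]:
--     """누락 필드 목록을 우선순위에 따라 정렬한다.
--
--     대리 여부(is_proxy_booking)가 가장 먼저 확인되어야 하고,
--     이후 환자 이름 → 연락처 → 분과 → 날짜 → 시간 → 생년월일 순으로 질문한다.
--     이 순서는 대화 UX 최적화를 위한 것이며, 대리 여부를 먼저 확인해야
--     patient_name이 customer_name과 동일한지 판단할 수 있기 때문이다.
--
--     우선순위: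
--         0: is_proxy_booking (대리 여부 — 반드시 최우선)
--         1: patient_name
--         2: patient_contact
--         3: department
--         4: date
--         5: time
--         6: birth_date
--         7: appointment_target
--         8: slot_selection
--         9: confirmation
--         10: customer_name
--
--     Args:
--         missing_info: 정렬 전 누락 필드 목록.
--
--     Returns:
--         list[str]: 우선순위에 따라 정렬된 중복 제거 목록.
--     """
--     priority = {
--         "is_proxy_booking": 0,
--         "patient_name": 1,
--         "patient_contact": 2,
--         "department": 3,
--         "date": 4,
--         "time": 5,
--         "birth_date": 6,
--         "appointment_target": 7,
--         "slot_selection": 8,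
--         "confirmation": 9,
--         "customer_name": 10,
--     }
--     deduped: list[str] = []
--     for item in missing_info:
--         if item and item not in deduped:
--             deduped.append(item)
--     return sorted(deduped, key=lambda item: (priority.get(item, 99), deduped.index(item)))
-- ===== SOURCE B (Python) =====
-- def _prioritize_missing_info(missing_info: list[str]) -> list[str]:
--     """Dedup (keeping first occurrence, skipping falsy items), then emit the
--     known fields by walking the fixed priority table in order, followed by the
--     unknown fields in first-occurrence order.  No sort, no index() tiebreak."""
--     priority_order = [
--         "is_proxy_booking",
--         "patient_name",
--         "patient_contact",
--         "department",
--         "date",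
--         "time",
--         "birth_date",
--         "appointment_target",
--         "slot_selection",
--         "confirmation",
--         "customer_name",
--     ]
--     deduped: list[str] = []
--     for item in missing_info:
--         if item and item not in deduped:
--             deduped.append(item)
--     known = [f for f in priority_order if f in deduped]
--     extras = [f for f in deduped if f not in priority_order]
--     return known + extras
-- ===== Notes on version B (the rewrite author's own statement) =====
-- stated objective: simpler
-- what changed: Replaces the sorted() call with (priority.get, deduped.index) tuple keys by a single bucket pass over the fixed priority table followed by the leftover fields in first-occurrence order; no sort and no repeated deduped.index scans.
import Mathlib
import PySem

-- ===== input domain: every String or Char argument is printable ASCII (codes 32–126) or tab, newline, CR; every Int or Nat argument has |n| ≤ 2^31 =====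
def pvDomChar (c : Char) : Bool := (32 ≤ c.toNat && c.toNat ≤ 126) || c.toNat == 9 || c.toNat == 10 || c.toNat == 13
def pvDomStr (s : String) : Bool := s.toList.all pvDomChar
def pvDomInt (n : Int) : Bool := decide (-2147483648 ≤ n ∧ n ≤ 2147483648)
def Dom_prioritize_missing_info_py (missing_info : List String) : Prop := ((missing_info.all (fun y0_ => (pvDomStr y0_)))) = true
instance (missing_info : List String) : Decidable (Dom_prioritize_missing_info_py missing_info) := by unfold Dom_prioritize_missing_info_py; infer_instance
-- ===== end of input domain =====

-- B replaces A's sorted() with tuple keys by a dedup pass followed by one walk over the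
-- fixed priority table and the leftover fields in first-occurrence order (objective: simpler).

-- ===== PORT A =====
def pvPriority : PySem.Dict String Int := PySem.Dict.ofList
  [("is_proxy_booking",0),("patient_name",1),("patient_contact",2),("department",3),
   ("date",4),("time",5),("birth_date",6),("appointment_target",7),("slot_selection",8),
   ("confirmation",9),("customer_name",10)]

def prioritize_missing_info_py (missing_info : List String) : List String :=
  let deduped := missing_info.foldl
    (fun acc item => if item ≠ "" ∧ item ∉ acc then acc ++ [item] else acc) []
  PySem.List.sorted2 deduped
    (fun item => pvPriority.getD item 99)
    (fun item => (((PySem.List.index? deduped item).getD 0 : Nat) : Int)) false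

-- ===== PORT B =====
def pvOrderB : List String :=
  ["is_proxy_booking","patient_name","patient_contact","department","date","time",
   "birth_date","appointment_target","slot_selection","confirmation","customer_name"]

def prioritize_missing_info_py_alt (missing_info : List String) : List String :=
  let deduped := missing_info.foldl
    (fun acc item => if item ≠ "" ∧ item ∉ acc then acc ++ [item] else acc) []
  let known := pvOrderB.filter (fun f => decide (f ∈ deduped))
  let extras := deduped.filter (fun f => decide (f ∉ pvOrderB))
  known ++ extras

-- ===== PRECONDITION & SPEC =====
def Spec_prioritize_missing_info_py (missing_info : List String) (out : List String) : Prop := out = prioritize_missing_info_py_alt missing_info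
instance (missing_info : List String) (out : List String) : Decidable (Spec_prioritize_missing_info_py missing_info out) := by unfold Spec_prioritize_missing_info_py; infer_instance

-- ===== CLAIM (what is proved, stated in full; the proofs are below) =====
def Claim_equal_prioritize_missing_info_py : Prop := ∀ (missing_info : List String), Dom_prioritize_missing_info_py missing_info → Spec_prioritize_missing_info_py missing_info (prioritize_missing_info_py missing_info)

-- ===== LEMMAS AND PROOFS =====

def pvDedup (xs : List String) : List String :=
  xs.foldl (fun acc item => if item ≠ "" ∧ item ∉ acc then acc ++ [item] else acc) []

def pvKey1 (x : String) : Int := pvPriority.getD x 99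

def pvIdx (d : List String) (x : String) : Int := (((PySem.List.index? d x).getD 0 : Nat) : Int)

def pvF (d : List String) (x : String) : Int := pvKey1 x * ((d.length : Int) + 1) + pvIdx d x

-- ---- facts about the priority table ----

lemma pv_order_nodup : pvOrderB.Nodup := by decide

lemma pv_key1_mem : ∀ x ∈ pvOrderB, 0 ≤ pvKey1 x ∧ pvKey1 x < 99 := by decide

lemma pv_order_pairwise : pvOrderB.Pairwise (fun a b => pvKey1 a < pvKey1 b) := by decide

lemma pv_key1_not_mem (x : String) (h : x ∉ pvOrderB) : pvKey1 x = 99 := by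
  simp only [pvOrderB, List.mem_cons, List.not_mem_nil, or_false, not_or] at h
  obtain ⟨h1,h2,h3,h4,h5,h6,h7,h8,h9,h10,h11⟩ := h
  have e1 : ("is_proxy_booking" == x) = false := beq_eq_false_iff_ne.mpr (fun he => h1 he.symm)
  have e2 : ("patient_name" == x) = false := beq_eq_false_iff_ne.mpr (fun he => h2 he.symm)
  have e3 : ("patient_contact" == x) = false := beq_eq_false_iff_ne.mpr (fun he => h3 he.symm)
  have e4 : ("department" == x) = false := beq_eq_false_iff_ne.mpr (fun he => h4 he.symm)
  have e5 : ("date" == x) = false := beq_eq_false_iff_ne.mpr (fun he => h5 he.symm)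
  have e6 : ("time" == x) = false := beq_eq_false_iff_ne.mpr (fun he => h6 he.symm)
  have e7 : ("birth_date" == x) = false := beq_eq_false_iff_ne.mpr (fun he => h7 he.symm)
  have e8 : ("appointment_target" == x) = false := beq_eq_false_iff_ne.mpr (fun he => h8 he.symm)
  have e9 : ("slot_selection" == x) = false := beq_eq_false_iff_ne.mpr (fun he => h9 he.symm)
  have e10 : ("confirmation" == x) = false := beq_eq_false_iff_ne.mpr (fun he => h10 he.symm)
  have e11 : ("customer_name" == x) = false := beq_eq_false_iff_ne.mpr (fun he => h11 he.symm)
  rw [pvKey1, show pvPriority = PySem.Dict.mk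
    [("is_proxy_booking",0),("patient_name",1),("patient_contact",2),("department",3),
     ("date",4),("time",5),("birth_date",6),("appointment_target",7),("slot_selection",8),
     ("confirmation",9),("customer_name",10)] from rfl]
  simp [PySem.Dict.getD, PySem.Dict.get?, List.find?, e1,e2,e3,e4,e5,e6,e7,e8,e9,e10,e11]

-- ---- facts about the dedup loop ----

lemma pv_dedup_nodup_aux (xs : List String) : ∀ acc : List String, acc.Nodup →
    (xs.foldl (fun acc item => if item ≠ "" ∧ item ∉ acc then acc ++ [item] else acc) acc).Nodup := by
  induction xs with
  | nil => intro acc h; simpa using h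
  | cons x xs ih =>
    intro acc hacc
    simp only [List.foldl_cons]
    by_cases hc : x ≠ "" ∧ x ∉ acc
    · rw [if_pos hc]
      refine ih _ ?_
      simp only [List.nodup_append, hacc, true_and]
      refine ⟨by simp, ?_⟩
      intro a ha b hb
      simp only [List.mem_singleton] at hb
      subst hb
      exact fun he => hc.2 (he ▸ ha)
    · rw [if_neg hc]; exact ih _ hacc

lemma pv_dedup_nodup (xs : List String) : (pvDedup xs).Nodup :=
  pv_dedup_nodup_aux xs [] (by simp)

-- ---- index? on a nodup list ----

lemma pv_index?_getElem {l : List String} (hn : l.Nodup) (i : Nat) (hi : i < l.length) :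
    PySem.List.index? l l[i] = some i := by
  rw [PySem.List.index?_eq_some_iff]
  refine ⟨l.take i, l.drop (i+1), ?_, by simp [Nat.min_eq_left (le_of_lt hi)], ?_⟩
  · conv_lhs => rw [← List.take_append_drop i l]
    congr 1
    rw [List.drop_eq_getElem_cons hi]
  · intro hmem
    obtain ⟨j, hj, hje⟩ := List.getElem_of_mem hmem
    rw [List.getElem_take] at hje
    have hji : j < i := lt_of_lt_of_le hj (by simp)
    have := (List.Nodup.getElem_inj_iff hn).mp hje
    omega

lemma pv_idx_pairwise {l : List String} (hn : l.Nodup) :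
    l.Pairwise (fun a b => pvIdx l a < pvIdx l b) := by
  rw [List.pairwise_iff_getElem]
  intro i j hi hj hij
  simp only [pvIdx, pv_index?_getElem hn i hi, pv_index?_getElem hn j hj, Option.getD_some]
  exact_mod_cast hij

lemma pv_idx_bounds {l : List String} {x : String} (hx : x ∈ l) :
    0 ≤ pvIdx l x ∧ pvIdx l x < (l.length : Int) := by
  have hs : (PySem.List.index? l x).isSome := (PySem.List.index?_isSome_iff l x).mpr hx
  obtain ⟨k, hk⟩ := Option.isSome_iff_exists.mp hs
  obtain ⟨hlt, -, -⟩ := PySem.List.getElem_of_index?_eq_some hk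
  simp only [pvIdx, hk, Option.getD_some]
  exact ⟨by positivity, by exact_mod_cast hlt⟩

-- ---- the combined key pvF orders lexicographically ----

lemma pv_f_lt {d : List String} {a b : String} (ha : a ∈ d) (hb : b ∈ d)
    (h : pvKey1 a < pvKey1 b ∨ (pvKey1 a = pvKey1 b ∧ pvIdx d a < pvIdx d b)) :
    pvF d a < pvF d b := by
  obtain ⟨ha0, haL⟩ := pv_idx_bounds ha
  obtain ⟨hb0, hbL⟩ := pv_idx_bounds hb
  rcases h with h | ⟨he, hi⟩
  · have hL : (0 : Int) ≤ (d.length : Int) + 1 := by positivity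
    have h1 : pvKey1 a + 1 ≤ pvKey1 b := h
    have h2 : (pvKey1 a + 1) * ((d.length : Int) + 1) ≤ pvKey1 b * ((d.length : Int) + 1) :=
      mul_le_mul_of_nonneg_right h1 hL
    simp only [pvF]
    nlinarith
  · simp only [pvF, he]
    omega

-- ---- insertBy / foldl congruence ----

lemma pv_insertBy_congr {α : Type} (bf bg : α → α → Bool) (x : α) (acc : List α)
    (h : ∀ y ∈ acc, bf x y = bg x y) :
    PySem.List.insertBy bf x acc = PySem.List.insertBy bg x acc := by
  induction acc with
  | nil => rfl
  | cons y ys ih =>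
    have hy := h y (by simp)
    show (if bf x y then x :: y :: ys else y :: PySem.List.insertBy bf x ys) =
         (if bg x y then x :: y :: ys else y :: PySem.List.insertBy bg x ys)
    rw [hy, ih (fun z hz => h z (by simp [hz]))]

lemma pv_foldl_insertBy_congr {α : Type} (bf bg : α → α → Bool) (S : List α)
    (h : ∀ a ∈ S, ∀ b ∈ S, bf a b = bg a b) :
    ∀ (xs acc : List α), (∀ x ∈ xs, x ∈ S) → (∀ y ∈ acc, y ∈ S) →
      xs.foldl (fun acc x => PySem.List.insertBy bf x acc) acc =
      xs.foldl (fun acc x => PySem.List.insertBy bg x acc) acc := by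
  intro xs
  induction xs with
  | nil => intros; rfl
  | cons x xs ih =>
    intro acc hxs hacc
    simp only [List.foldl_cons]
    rw [pv_insertBy_congr bf bg x acc (fun y hy => h x (hxs x (by simp)) y (hacc y hy))]
    refine ih _ (fun z hz => hxs z (by simp [hz])) (fun y hy => ?_)
    rcases (PySem.List.mem_insertBy bg x y acc).mp hy with h' | h'
    · exact h' ▸ hxs x (by simp)
    · exact hacc y h'

-- ---- the main equality, stated over an arbitrary nodup list d (the dedup result) ----

lemma pv_main (d : List String) (hn : d.Nodup) :
    PySem.List.sorted2 d (fun item => pvPriority.getD item 99)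
      (fun item => (((PySem.List.index? d item).getD 0 : Nat) : Int)) false =
    pvOrderB.filter (fun f => decide (f ∈ d)) ++ d.filter (fun f => decide (f ∉ pvOrderB)) := by
  set ys := pvOrderB.filter (fun f => decide (f ∈ d)) ++ d.filter (fun f => decide (f ∉ pvOrderB)) with hys
  -- step 1: replace the tuple comparison by the single injective key pvF d
  have e1 : PySem.List.sorted2 d (fun item => pvPriority.getD item 99)
      (fun item => (((PySem.List.index? d item).getD 0 : Nat) : Int)) false =
      d.foldl (fun acc x => PySem.List.insertBy
        (fun a b => decide (pvKey1 a < pvKey1 b) ||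
          (!decide (pvKey1 b < pvKey1 a) && decide (pvIdx d a < pvIdx d b))) x acc) [] := rfl
  have e2 : PySem.List.sorted d (pvF d) false =
      d.foldl (fun acc x => PySem.List.insertBy
        (fun a b => decide (pvF d a < pvF d b)) x acc) [] := rfl
  have hcong : ∀ a ∈ d, ∀ b ∈ d,
      (decide (pvKey1 a < pvKey1 b) ||
        (!decide (pvKey1 b < pvKey1 a) && decide (pvIdx d a < pvIdx d b))) =
      decide (pvF d a < pvF d b) := by
    intro a ha b hb
    rcases lt_trichotomy (pvKey1 a) (pvKey1 b) with h | h | h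
    · have hf := pv_f_lt ha hb (Or.inl h)
      simp [h, hf]
    · have hiff : pvF d a < pvF d b ↔ pvIdx d a < pvIdx d b := by
        simp only [pvF, h]
        omega
      simp only [h, lt_irrefl, decide_false, Bool.false_or, Bool.not_false, Bool.true_and]
      rw [decide_eq_decide]
      exact hiff.symm
    · have hf := pv_f_lt hb ha (Or.inl h)
      have : ¬ pvF d a < pvF d b := not_lt.mpr (le_of_lt hf)
      simp [not_lt.mpr (le_of_lt h), h, this]
  have step1 : PySem.List.sorted2 d (fun item => pvPriority.getD item 99)
      (fun item => (((PySem.List.index? d item).getD 0 : Nat) : Int)) false =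
      PySem.List.sorted d (pvF d) false := by
    rw [e1, e2]
    exact pv_foldl_insertBy_congr _ _ d hcong d [] (fun x hx => hx) (by simp)
  -- step 2: ys is a permutation of d, strictly increasing under pvF d
  have hperm : ys.Perm d := by
    have hp2 : (pvOrderB.filter (fun f => decide (f ∈ d))).Perm
        (d.filter (fun x => decide (x ∈ pvOrderB))) := by
      rw [List.perm_ext_iff_of_nodup (pv_order_nodup.filter _) (hn.filter _)]
      intro x
      simp only [List.mem_filter, decide_eq_true_eq]
      tauto
    have hnot : (d.filter (fun f => decide (f ∉ pvOrderB))) =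
        d.filter (fun x => !decide (x ∈ pvOrderB)) := by
      simp only [decide_not]
    rw [hys, hnot]
    exact (hp2.append_right _).trans (List.filter_append_perm _ d)
  have hpw : ys.Pairwise (fun a b => pvF d a < pvF d b) := by
    rw [hys, List.pairwise_append]
    refine ⟨?_, ?_, ?_⟩
    · refine (pv_order_pairwise.filter _).imp_of_mem ?_
      intro a b ha hb hr
      have ha' : a ∈ d := by simpa using (List.mem_filter.mp ha).2
      have hb' : b ∈ d := by simpa using (List.mem_filter.mp hb).2
      exact pv_f_lt ha' hb' (Or.inl hr)
    · refine ((pv_idx_pairwise hn).sublist (List.filter_sublist (l := d))).imp_of_mem ?_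
      intro a b ha hb hr
      obtain ⟨ha', hna⟩ := List.mem_filter.mp ha
      obtain ⟨hb', hnb⟩ := List.mem_filter.mp hb
      refine pv_f_lt ha' hb' (Or.inr ⟨?_, hr⟩)
      rw [pv_key1_not_mem a (by simpa using hna), pv_key1_not_mem b (by simpa using hnb)]
    · intro a ha b hb
      obtain ⟨hao, had⟩ := List.mem_filter.mp ha
      obtain ⟨hbd, hbn⟩ := List.mem_filter.mp hb
      refine pv_f_lt (by simpa using had) hbd (Or.inl ?_)
      rw [pv_key1_not_mem b (by simpa using hbn)]
      exact (pv_key1_mem a hao).2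
  rw [step1]
  exact PySem.List.sorted_eq_of_perm_of_pairwise_lt d ys (pvF d) hperm hpw

-- ===== VERDICT (by name: the statement is the Claim_ definition above) =====
theorem prioritize_missing_info_py_spec : Claim_equal_prioritize_missing_info_py := by
  intro xs _
  show prioritize_missing_info_py xs = prioritize_missing_info_py_alt xs
  have hA : prioritize_missing_info_py xs =
      PySem.List.sorted2 (pvDedup xs) (fun item => pvPriority.getD item 99)
        (fun item => (((PySem.List.index? (pvDedup xs) item).getD 0 : Nat) : Int)) false := rfl
  have hB : prioritize_missing_info_py_alt xs =
      pvOrderB.filter (fun f => decide (f ∈ pvDedup xs)) ++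
        (pvDedup xs).filter (fun f => decide (f ∉ pvOrderB)) := rfl
  rw [hA, hB]
  exact pv_main (pvDedup xs) (pv_dedup_nodup xs)
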